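-- pv_equiv track=rewrite | github.com/pypi-data/pypi-mirror-395 | packages/uproot-custom/uproot_custom-2.1.1-cp310-cp310-manylinux_2_27_x86_64.manylinux_2_28_x86_64.whl/uproot_custom/utils.py | get_sequence_element_typename
-- ===== SOURCE A (Python) =====
-- def get_sequence_element_typename(type_name: str) -> str:
--     """
--     Get the element type name of a vector type.
--
--     e.g. vector<vector<int>> -> vector<int>
--     """
--     type_name = type_name.replace("std::", "").replace("< ", "<").replace(" >", ">").strip()
--
--     lt_idx = -1
--     gt_idx = -1
--     stack_level = 0
--
--     for i, c in enumerate(type_name):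
--         if c == "<":
--             stack_level += 1
--             if stack_level == 1:
--                 lt_idx = i
--
--         if c == ">":
--             stack_level -= 1
--             if stack_level == 0:
--                 gt_idx = i
--                 break
--
--     if lt_idx == -1 or gt_idx == -1:
--         raise ValueError(f"Invalid sequence type name: {type_name}")
--
--     if gt_idx != len(type_name) - 1:
--         raise ValueError(f"Invalid sequence type name: {type_name}")
--
--     return type_name[lt_idx + 1 : gt_idx]
-- ===== SOURCE B (Python) =====
-- def get_sequence_element_typename(type_name: str) -> str:
--     """
--     Get the element type name of a vector type.
--
--     e.g. vector<vector<int>> -> vector<int>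
--     """
--     type_name = type_name.replace("std::", "").replace("< ", "<").replace(" >", ">").strip()
--
--     lt_idx = type_name.find("<")
--     if lt_idx == -1 or not type_name.endswith(">"):
--         raise ValueError(f"Invalid sequence type name: {type_name}")
--
--     inner = type_name[lt_idx + 1 : -1]
--
--     depth = 0
--     for c in inner:
--         if c == "<":
--             depth += 1
--         elif c == ">":
--             depth -= 1
--             if depth < 0:
--                 raise ValueError(f"Invalid sequence type name: {type_name}")
--     if depth != 0:
--         raise ValueError(f"Invalid sequence type name: {type_name}")
--
--     return inner
-- ===== Notes on version B (the rewrite author's own statement) =====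
-- stated objective: simpler
-- what changed: Replaces the fused enumerate-scan that tracks lt_idx/gt_idx/stack_level with a break by a plain decomposition: a find of the first open bracket plus an endswith check pick the slice, then a separate depth loop validates balance of the inner part.
-- outside the precondition, e.g. on get_sequence_element_typename('><<a>'): A returns 'a', B raises ValueError
import Mathlib
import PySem

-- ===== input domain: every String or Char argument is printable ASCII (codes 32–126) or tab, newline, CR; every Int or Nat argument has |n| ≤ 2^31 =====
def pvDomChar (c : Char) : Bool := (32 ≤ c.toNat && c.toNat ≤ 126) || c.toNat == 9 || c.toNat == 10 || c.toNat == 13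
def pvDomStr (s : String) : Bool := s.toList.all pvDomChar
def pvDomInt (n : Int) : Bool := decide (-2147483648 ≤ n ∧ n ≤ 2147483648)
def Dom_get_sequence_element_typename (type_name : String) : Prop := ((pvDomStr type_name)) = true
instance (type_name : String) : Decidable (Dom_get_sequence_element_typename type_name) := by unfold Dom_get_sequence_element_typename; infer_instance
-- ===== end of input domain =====

-- B replaces A's fused enumerate-scan (lt_idx/gt_idx/stack_level with a break) by find('<') +
-- endswith('>') + a separate depth-validation loop over the inner slice: a simpler decomposition, same O(n).
-- the normalisation step both Pythons share: replace "std::"/"< "/" >", then strip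
def pvNorm (s : String) : String :=
  PySem.Str.strip (PySem.Str.replace (PySem.Str.replace (PySem.Str.replace s "std::" "") "< " "<") " >" ">")

-- ===== PORT A =====
-- A's fused scan: char list, i, lt_idx, gt_idx, stack_level; returns (lt_idx, gt_idx); 'break' = early return
def pvLoopA : List Char → Int → Int → Int → Int → Int × Int
  | [], _, lt, gt, _ => (lt, gt)
  | c :: cs, i, lt, gt, st =>
    if c = '<' then
      let st' := st + 1
      let lt' := if st' = 1 then i else lt
      pvLoopA cs (i + 1) lt' gt st'
    else if c = '>' then
      let st' := st - 1
      if st' = 0 then (lt, i)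
      else pvLoopA cs (i + 1) lt gt st'
    else pvLoopA cs (i + 1) lt gt st

def get_sequence_element_typename (type_name : String) : String :=
  let t := pvNorm type_name
  let r := pvLoopA t.toList 0 (-1) (-1) 0
  if r.1 = -1 ∨ r.2 = -1 then ""            -- Python: raise ValueError (outside Pre_)
  else if r.2 ≠ PySem.Str.len t - 1 then "" -- Python: raise ValueError (outside Pre_)
  else String.ofList (PySem.List.slice t.toList (some (r.1 + 1)) (some r.2))

-- ===== PORT B =====
-- B's separate balance validation of the inner slice: none = the ValueError raised inside the loop
def pvAltCheck : List Char → Int → Option Int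
  | [], d => some d
  | c :: cs, d =>
    if c = '<' then pvAltCheck cs (d + 1)
    else if c = '>' then
      if d - 1 < 0 then none else pvAltCheck cs (d - 1)
    else pvAltCheck cs d

def get_sequence_element_typename_alt (type_name : String) : String :=
  let t := pvNorm type_name
  let lt := PySem.Str.find t "<"
  if lt = -1 ∨ ¬ (PySem.Str.endswith t ">" = true) then ""  -- Python: raise ValueError (outside Pre_)
  else
    let inner := PySem.List.slice t.toList (some (lt + 1)) (some (-1))
    match pvAltCheck inner 0 with
    | none => ""                                            -- Python: raise ValueError (outside Pre_)
    | some d => if d ≠ 0 then "" else String.ofList inner   -- d ≠ 0: raise (outside Pre_)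

-- ===== PRECONDITION & SPEC =====
-- bracket weight of a character: +1 for '<', -1 for '>', 0 otherwise
def pvDelta (c : Char) : Int := if c = '<' then 1 else if c = '>' then -1 else 0

-- Pre_ = the normalised string is p ++ '<' ++ inner ++ '>' with no '<' or '>' in p and inner
-- bracket-balanced (every prefix sum of bracket weights is ≥ 0 and the total is 0).
-- Besides all inputs on which Python A raises ValueError, this excludes inputs such as "><<a>"
-- on which A still RETURNS a value: there a leading close-bracket drives A's counter negative
-- and its answer is an accident of that tolerance; B (naturally) raises ValueError there.
def Pre_get_sequence_element_typename (type_name : String) : Prop :=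
  let t := (pvNorm type_name).toList
  let lt := t.findIdx (· = '<')
  let inner := (t.drop (lt + 1)).dropLast
  lt < t.length ∧ '>' ∉ t.take lt ∧ t.getLast? = some '>' ∧
    (∀ k, k ≤ inner.length → 0 ≤ ((inner.take k).map pvDelta).sum) ∧
    (inner.map pvDelta).sum = 0

instance (type_name : String) : Decidable (Pre_get_sequence_element_typename type_name) := by
  unfold Pre_get_sequence_element_typename; infer_instance

def pvWitness_get_sequence_element_typename : String := "vector<vector<int>>"

def Spec_get_sequence_element_typename (type_name : String) (out : String) : Prop := out = get_sequence_element_typename_alt type_name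
instance (type_name : String) (out : String) : Decidable (Spec_get_sequence_element_typename type_name out) := by unfold Spec_get_sequence_element_typename; infer_instance

-- ===== CLAIM (what is proved, stated in full; the proofs are below) =====
def Claim_equal_get_sequence_element_typename : Prop := ∀ (type_name : String), Dom_get_sequence_element_typename type_name → Pre_get_sequence_element_typename type_name → Spec_get_sequence_element_typename type_name (get_sequence_element_typename type_name)

-- ===== LEMMAS AND PROOFS =====

-- proof-side balance test: bracket depth never goes negative and is zero at the end
def pvBal : List Char → Int → Bool
  | [], d => d = 0
  | c :: cs, d =>
    if c = '<' then pvBal cs (d + 1)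
    else if c = '>' then
      if d - 1 < 0 then false else pvBal cs (d - 1)
    else pvBal cs d

-- the closed-form prefix-sum condition of Pre_ implies the depth test
lemma pvBal_of_closed (l : List Char) (d : Int) (hd : 0 ≤ d)
    (h1 : ∀ k, k ≤ l.length → 0 ≤ d + ((l.take k).map pvDelta).sum)
    (h2 : d + (l.map pvDelta).sum = 0) : pvBal l d = true := by
  induction l generalizing d with
  | nil =>
    simp only [List.map_nil, List.sum_nil, add_zero] at h2
    simp [pvBal, h2]
  | cons c cs ih =>
    have hdc : ∀ k, k ≤ cs.length → 0 ≤ (d + pvDelta c) + ((cs.take k).map pvDelta).sum := by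
      intro k hk
      have h := h1 (k + 1) (by simpa using Nat.succ_le_succ hk)
      simp only [List.take_succ_cons, List.map_cons, List.sum_cons] at h
      linarith
    have hs2 : (d + pvDelta c) + (cs.map pvDelta).sum = 0 := by
      simp only [List.map_cons, List.sum_cons] at h2
      linarith
    by_cases hlt : c = '<'
    · subst hlt
      rw [show pvDelta '<' = 1 from rfl] at hdc hs2
      simp only [pvBal]
      exact ih (d + 1) (by linarith) hdc hs2
    · by_cases hgt : c = '>'
      · subst hgt
        rw [show pvDelta '>' = -1 from rfl] at hdc hs2
        have h0 := hdc 0 (Nat.zero_le _)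
        simp only [List.take_zero, List.map_nil, List.sum_nil, add_zero] at h0
        have hd1 : ¬ (d - 1 < 0) := by linarith
        simp only [pvBal, if_neg (show ¬ (('>' : Char) = '<') from by decide), if_neg hd1]
        exact ih (d - 1) (by linarith) (by simpa [sub_eq_add_neg] using hdc)
          (by linarith)
      · rw [show pvDelta c = 0 from by simp [pvDelta, hlt, hgt]] at hdc hs2
        simp only [pvBal, if_neg hlt, if_neg hgt]
        exact ih d hd (by simpa using hdc) (by linarith)

-- A's scan over characters that are neither '<' nor '>' only advances the index
lemma pvLoopA_prefix (p : List Char) (rest : List Char) (lt : Int)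
    (h : ∀ c ∈ p, c ≠ '<' ∧ c ≠ '>') (i : Int) :
    pvLoopA (p ++ rest) i lt (-1) 0 = pvLoopA rest (i + p.length) lt (-1) 0 := by
  induction p generalizing i with
  | nil => simp
  | cons c cs ih =>
    have hc := h c (by simp)
    have hcs : ∀ c ∈ cs, c ≠ '<' ∧ c ≠ '>' := fun c hm => h c (by simp [hm])
    simp only [List.cons_append, pvLoopA, if_neg hc.1, if_neg hc.2]
    rw [ih hcs (i + 1)]
    have he : i + 1 + (cs.length : Int) = i + ((c :: cs).length : Int) := by
      push_cast [List.length_cons]; omega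
    rw [he]

-- A's scan inside the brackets: depth stays positive until the matching '>' at the end
lemma pvLoopA_inner (inner : List Char) (d i lt : Int)
    (hd : 0 ≤ d) (hb : pvBal inner d = true) :
    pvLoopA (inner ++ ['>']) i lt (-1) (d + 1) = (lt, i + inner.length) := by
  induction inner generalizing d i with
  | nil =>
    have hb0 : d = 0 := by simpa [pvBal] using hb
    subst hb0
    have h1 : ¬ (('>' : Char) = '<') := by decide
    simp [pvLoopA, h1]
  | cons c cs ih =>
    by_cases hlt : c = '<'
    · subst hlt
      have hb' : pvBal cs (d + 1) = true := by simpa [pvBal] using hb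
      simp only [List.cons_append, pvLoopA]
      have hne : ¬ (d + 1 + 1 = 1) := by omega
      rw [if_neg hne]
      rw [ih (d + 1) (i + 1) (by omega) hb']
      have he : i + 1 + (cs.length : Int) = i + (('<' :: cs).length : Int) := by
        push_cast [List.length_cons]; omega
      rw [he]
      simp
    · by_cases hgt : c = '>'
      · subst hgt
        have hb1 : (if d - 1 < 0 then false else pvBal cs (d - 1)) = true := by
          simpa [pvBal, show ¬ (('>' : Char) = '<') from by decide] using hb
        have hd1 : ¬ (d - 1 < 0) := by
          intro hneg; rw [if_pos hneg] at hb1; cases hb1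
        rw [if_neg hd1] at hb1
        simp only [List.cons_append, pvLoopA,
          if_neg (show ¬ (('>' : Char) = '<') from by decide)]
        have hne : ¬ (d + 1 - 1 = 0) := by omega
        rw [if_neg hne]
        have hstep : d + 1 - 1 = (d - 1) + 1 := by omega
        rw [hstep, ih (d - 1) (i + 1) (by omega) hb1]
        have he : i + 1 + (cs.length : Int) = i + (('>' :: cs).length : Int) := by
          push_cast [List.length_cons]; omega
        rw [he]
        simp
      · have hb' : pvBal cs d = true := by simpa [pvBal, hlt, hgt] using hb
        simp only [List.cons_append, pvLoopA, if_neg hlt, if_neg hgt]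
        rw [ih d (i + 1) hd hb']
        have he : i + 1 + (cs.length : Int) = i + ((c :: cs).length : Int) := by
          push_cast [List.length_cons]; omega
        rw [he]

-- B's validation loop accepts whatever pvBal accepts
lemma pvAltCheck_of_pvBal (l : List Char) (d : Int) (hb : pvBal l d = true) :
    pvAltCheck l d = some 0 := by
  induction l generalizing d with
  | nil =>
    have hb0 : d = 0 := by simpa [pvBal] using hb
    simp [pvAltCheck, hb0]
  | cons c cs ih =>
    by_cases hlt : c = '<'
    · have hb' : pvBal cs (d + 1) = true := by simpa [pvBal, hlt] using hb
      simp only [pvAltCheck, if_pos hlt]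
      exact ih _ hb'
    · by_cases hgt : c = '>'
      · have hb1 : (if d - 1 < 0 then false else pvBal cs (d - 1)) = true := by
          simpa [pvBal, hlt, hgt] using hb
        have hd1 : ¬ (d - 1 < 0) := by
          intro hneg; rw [if_pos hneg] at hb1; cases hb1
        rw [if_neg hd1] at hb1
        simp only [pvAltCheck, if_neg hlt, if_pos hgt, if_neg hd1]
        exact ih _ hb1
      · have hb' : pvBal cs d = true := by simpa [pvBal, hlt, hgt] using hb
        simp only [pvAltCheck, if_neg hlt, if_neg hgt]
        exact ih _ hb'

-- list-shape consequences of Pre_: the normalised string decomposes as p ++ '<' :: inner ++ ['>']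
lemma decomp_of_pre (t : List Char) (n : Nat)
    (hn : n = t.findIdx (· = '<')) (hlt : n < t.length) (hlast : t.getLast? = some '>') :
    t = t.take n ++ '<' :: ((t.drop (n + 1)).dropLast ++ ['>']) ∧ '<' ∉ t.take n := by
  have hget : t[n] = '<' := by
    subst hn
    have := List.findIdx_getElem (w := hlt)
    simpa using this
  have hsplit : t = t.take n ++ t[n] :: t.drop (n + 1) := by
    have h0 := (List.take_append_drop n t).symm
    rwa [List.drop_eq_getElem_cons hlt] at h0
  have hne : t.drop (n + 1) ≠ [] := by
    intro h0
    rw [h0] at hsplit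
    have h1 : t.getLast? = some t[n] := by
      conv_lhs => rw [hsplit]
      simp only [List.getLast?_concat]
    rw [hlast, hget] at h1
    exact absurd (Option.some.inj h1) (by decide)
  have hsplit2 : t = (t.take n ++ [t[n]]) ++ t.drop (n + 1) := by
    conv_lhs => rw [hsplit]
    simp
  have hl2 : t.getLast? = (t.drop (n + 1)).getLast? := by
    conv_lhs => rw [hsplit2]
    exact List.getLast?_append_of_ne_nil _ hne
  have hlast2 : (t.drop (n + 1)).getLast? = some '>' := hl2.symm.trans hlast
  have hinner : (t.drop (n + 1)).dropLast ++ ['>'] = t.drop (n + 1) :=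
    List.dropLast_append_getLast? '>' hlast2
  constructor
  · conv_lhs => rw [hsplit]
    rw [hget, hinner]
  · intro hmem
    obtain ⟨i, hi, hig⟩ := List.getElem_of_mem hmem
    have hi' : i < n := by
      have := hi; simp [List.length_take] at this; omega
    rw [List.getElem_take] at hig
    have hnp := List.not_of_lt_findIdx (p := fun x => decide (x = '<')) (xs := t) (hn ▸ hi')
    exact absurd hig (of_decide_eq_false hnp)

-- str.find('<') points at the first '<'
lemma find_of_decomp (p rest : List Char) (hp : '<' ∉ p) :
    PySem.Chars.find (p ++ '<' :: rest) ['<'] = (p.length : Int) := by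
  have hinf : ['<'] <:+: (p ++ '<' :: rest) := ⟨p, rest, by simp⟩
  have hnn : 0 ≤ PySem.Chars.find (p ++ '<' :: rest) ['<'] :=
    (PySem.Chars.find_nonneg_iff _ _).mpr hinf
  obtain ⟨hpre, hmin⟩ := PySem.Chars.find_spec hnn
  have hdropP : (p ++ '<' :: rest).drop p.length = '<' :: rest := @List.drop_left Char p ('<' :: rest)
  have hle : (PySem.Chars.find (p ++ '<' :: rest) ['<']).toNat ≤ p.length := by
    by_contra hgt
    exact hmin p.length (by omega) (by rw [hdropP]; exact ⟨rest, rfl⟩)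
  have hnotlt : ¬ ((PySem.Chars.find (p ++ '<' :: rest) ['<']).toNat < p.length) := by
    intro hflt
    obtain ⟨u, hu⟩ := hpre
    rw [List.drop_append_of_le_length (by omega),
      List.drop_eq_getElem_cons hflt] at hu
    simp only [List.singleton_append] at hu
    have hhd : p[(PySem.Chars.find (p ++ '<' :: rest) ['<']).toNat] = '<' := by
      injection hu with h1 h2
      exact h1.symm
    exact hp (hhd ▸ List.getElem_mem hflt)
  have hfeq : (PySem.Chars.find (p ++ '<' :: rest) ['<']).toNat = p.length := by omega
  rw [← Int.toNat_of_nonneg hnn, hfeq]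

lemma drop_decomp (p inner : List Char) :
    (p ++ '<' :: (inner ++ ['>'])).drop (p.length + 1) = inner ++ ['>'] := by
  have h : p ++ '<' :: (inner ++ ['>']) = (p ++ ['<']) ++ (inner ++ ['>']) := by simp
  rw [h, show p.length + 1 = (p ++ ['<']).length by simp]
  exact List.drop_left

lemma take_decomp (inner : List Char) : (inner ++ ['>']).take inner.length = inner :=
  List.take_left

lemma len_decomp (p inner : List Char) :
    (p ++ '<' :: (inner ++ ['>'])).length = p.length + inner.length + 2 := by
  simp only [List.length_append, List.length_cons, List.length_nil]
  omega

-- B's slice t[lt+1:-1] is exactly inner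
lemma slice_inner (p inner : List Char) :
    PySem.List.slice (p ++ '<' :: (inner ++ ['>'])) (some ((p.length : Int) + 1)) (some (-1)) = inner := by
  rw [show ((p.length : Int) + 1) = (((p.length + 1 : Nat)) : Int) by push_cast; ring]
  simp only [PySem.List.slice, PySem.List.clampIdx_neg_one, PySem.List.clampIdx_natCast]
  rw [len_decomp]
  rw [Nat.min_eq_left (by omega : p.length + 1 ≤ p.length + inner.length + 2)]
  rw [show p.length + inner.length + 2 - 1 - (p.length + 1) = inner.length by omega]
  rw [drop_decomp, take_decomp]

-- evaluation of port A under the decomposition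
lemma A_eval (s : String) (p inner : List Char)
    (hdec : (pvNorm s).toList = p ++ '<' :: (inner ++ ['>']))
    (hpl : '<' ∉ p) (hpg : '>' ∉ p) (hbal : pvBal inner 0 = true) :
    get_sequence_element_typename s = String.ofList inner := by
  have hpc : ∀ c ∈ p, c ≠ '<' ∧ c ≠ '>' :=
    fun c hc => ⟨fun h => hpl (h ▸ hc), fun h => hpg (h ▸ hc)⟩
  have hloop : pvLoopA (p ++ '<' :: (inner ++ ['>'])) 0 (-1) (-1) 0
      = ((p.length : Int), (p.length : Int) + 1 + inner.length) := by
    rw [pvLoopA_prefix p _ (-1) hpc 0]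
    simp only [pvLoopA]
    norm_num
    have h := pvLoopA_inner inner 0 ((p.length : Int) + 1) (p.length : Int) le_rfl hbal
    norm_num at h
    exact h
  have hlen2 : PySem.Str.len (pvNorm s) = (p.length : Int) + inner.length + 2 := by
    rw [PySem.Str.len_eq, hdec, len_decomp]
    push_cast
    ring
  simp only [get_sequence_element_typename, hdec, hloop]
  have hc1 : ¬ (((p.length : Int)) = -1 ∨ ((p.length : Int) + 1 + inner.length) = -1) := by
    intro h
    rcases h with h | h <;> omega
  rw [if_neg hc1]
  have hc2 : ¬ (((p.length : Int) + 1 + inner.length) ≠ PySem.Str.len (pvNorm s) - 1) := by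
    rw [hlen2]; simp only [ne_eq, not_not]; ring
  rw [if_neg hc2]
  rw [show ((p.length : Int) + 1) = (((p.length + 1 : Nat)) : Int) by push_cast; ring]
  rw [PySem.List.slice_natCast_add, drop_decomp, take_decomp]

-- evaluation of port B under the decomposition
lemma B_eval (s : String) (p inner : List Char)
    (hdec : (pvNorm s).toList = p ++ '<' :: (inner ++ ['>']))
    (hpl : '<' ∉ p) (hbal : pvBal inner 0 = true) :
    get_sequence_element_typename_alt s = String.ofList inner := by
  have hfind : PySem.Str.find (pvNorm s) "<" = (p.length : Int) := by
    rw [PySem.Str.find_eq, hdec, show ("<" : String).toList = ['<'] from by decide]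
    exact find_of_decomp p _ hpl
  have hends : PySem.Str.endswith (pvNorm s) ">" = true := by
    rw [PySem.Str.endswith_eq, hdec, show (">" : String).toList = ['>'] from by decide]
    exact (PySem.Chars.endswith_iff _ _).mpr ⟨p ++ '<' :: inner, by simp⟩
  simp only [get_sequence_element_typename_alt, hdec, hfind, hends]
  have hc : ¬ (((p.length : Int)) = -1 ∨ ¬ True) := by
    simp only [not_true, or_false]
    omega
  rw [if_neg hc]
  rw [slice_inner, pvAltCheck_of_pvBal inner 0 hbal]
  norm_num

-- ===== VERDICT (by name: the statement is the Claim_ definition above) =====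
theorem get_sequence_element_typename_spec : Claim_equal_get_sequence_element_typename := by
  unfold Claim_equal_get_sequence_element_typename
  intro s hdom hpre
  unfold Spec_get_sequence_element_typename
  simp only [Pre_get_sequence_element_typename] at hpre
  obtain ⟨hlt, hpg, hlast, h1, h2⟩ := hpre
  have hbal : pvBal (((pvNorm s).toList.drop ((pvNorm s).toList.findIdx (· = '<') + 1)).dropLast) 0 = true := by
    refine pvBal_of_closed _ 0 le_rfl (fun k hk => ?_) (by linarith [h2])
    linarith [h1 k hk]
  obtain ⟨hdec, hpl⟩ := decomp_of_pre (pvNorm s).toList _ rfl hlt hlast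
  rw [A_eval s _ _ hdec hpl hpg hbal, B_eval s _ _ hdec hpl hbal]
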